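-- pv_equiv track=rewrite | github.com/jkclark/Project-Euler | solutions/084.py | get_next_company_location
-- ===== SOURCE A (Python) =====
-- def get_next_company_location(
--
--     company_locations: int,
--     player_location: int,
-- ) -> int:
--     """Get the location of the next company square.
--
--     company_locations should be in increasing order.
--     """
--     for company_location in company_locations:
--         if player_location < company_location:
--             return company_location
--
--     return company_locations[0]
-- ===== SOURCE B (Python) =====
-- def get_next_company_location(
--     company_locations: int,
--     player_location: int,
-- ) -> int:
--     """Get the location of the next company square.
--
--     company_locations should be in increasing order.
--     """
--     result = company_locations[0]
--     for c in reversed(company_locations):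
--         if player_location < c:
--             result = c
--     return result
-- ===== Notes on version B (the rewrite author's own statement) =====
-- stated objective: alternative
-- what changed: Replaces the early-return forward scan with a reverse-order fold over an accumulator: walking the list back to front, the leftmost element exceeding player_location is written last and so wins, with company_locations[0] as the initial fallback.
import Mathlib
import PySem

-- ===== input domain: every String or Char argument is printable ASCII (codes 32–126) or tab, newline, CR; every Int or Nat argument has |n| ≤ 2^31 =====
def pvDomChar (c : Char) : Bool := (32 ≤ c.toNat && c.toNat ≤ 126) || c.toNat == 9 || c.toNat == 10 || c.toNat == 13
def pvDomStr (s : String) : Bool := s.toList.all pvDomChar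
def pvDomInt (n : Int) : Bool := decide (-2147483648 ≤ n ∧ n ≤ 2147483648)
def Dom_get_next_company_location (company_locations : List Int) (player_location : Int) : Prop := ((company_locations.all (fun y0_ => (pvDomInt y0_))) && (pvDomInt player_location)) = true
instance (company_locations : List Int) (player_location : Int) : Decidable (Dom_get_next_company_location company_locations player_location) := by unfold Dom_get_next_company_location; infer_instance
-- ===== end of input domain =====

-- B replaces A's early-return forward scan by a reverse fold with an accumulator (alternative structure, same cost).
-- ===== PORT A =====
-- the for-loop with early return: first element c with player_location < c, if any
def pvScanA (company_locations : List Int) (player_location : Int) : Option Int :=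
  match company_locations with
  | [] => none
  | c :: rest => if player_location < c then some c else pvScanA rest player_location

def get_next_company_location (company_locations : List Int) (player_location : Int) : Int :=
  match pvScanA company_locations player_location with
  | some c => c
  | none => (PySem.List.pyGet? company_locations 0).getD 0  -- empty list raises IndexError: excluded by Pre_

-- ===== PORT B =====
def get_next_company_location_alt (company_locations : List Int) (player_location : Int) : Int :=
  let result := (PySem.List.pyGet? company_locations 0).getD 0  -- IndexError on []: excluded by Pre_
  company_locations.reverse.foldl (fun acc c => if player_location < c then c else acc) result

-- ===== PRECONDITION & SPEC =====
-- Pre_ excludes only the empty list, on which both A and B raise IndexError.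
def Pre_get_next_company_location (company_locations : List Int) (player_location : Int) : Prop := company_locations ≠ []
instance (company_locations : List Int) (player_location : Int) : Decidable (Pre_get_next_company_location company_locations player_location) := by unfold Pre_get_next_company_location; infer_instance
def pvWitness_get_next_company_location : List Int × Int := ([1, 5, 9], 4)
def Spec_get_next_company_location (company_locations : List Int) (player_location : Int) (out : Int) : Prop := out = get_next_company_location_alt company_locations player_location
instance (company_locations : List Int) (player_location : Int) (out : Int) : Decidable (Spec_get_next_company_location company_locations player_location out) := by unfold Spec_get_next_company_location; infer_instance

-- ===== CLAIM (what is proved, stated in full; the proofs are below) =====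
def Claim_equal_get_next_company_location : Prop := ∀ (company_locations : List Int) (player_location : Int), Dom_get_next_company_location company_locations player_location → Pre_get_next_company_location company_locations player_location → Spec_get_next_company_location company_locations player_location (get_next_company_location company_locations player_location)

-- ===== LEMMAS AND PROOFS =====
theorem pv_fold_eq (player_location : Int) (xs : List Int) (init : Int) :
    xs.reverse.foldl (fun acc c => if player_location < c then c else acc) init
      = (match pvScanA xs player_location with | some c => c | none => init) := by
  induction xs generalizing init with
  | nil => simp [pvScanA]
  | cons x rest ih =>
    simp only [List.reverse_cons, List.foldl_append, List.foldl_cons, List.foldl_nil, pvScanA, ih]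
    by_cases h : player_location < x
    · simp [h]
    · simp [h]

-- ===== VERDICT (by name: the statement is the Claim_ definition above) =====
theorem get_next_company_location_spec : Claim_equal_get_next_company_location := by
  intro xs p _ _
  unfold Spec_get_next_company_location get_next_company_location get_next_company_location_alt
  rw [pv_fold_eq]
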